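-- pv_equiv track=rewrite | github.com/rasheeqa3007/python-program | distributed_books.py | distribute_books
-- ===== SOURCE A (Python) =====
-- def is_possible(books, students, max_pages):
--     student_count = 1
--     current_pages = 0
--
--     for pages in books:
--         if pages > max_pages:
--             return False
--
--         if current_pages + pages > max_pages:
--             student_count += 1
--             current_pages = pages
--
--             if student_count > students:
--                 return False
--         else:
--             current_pages += pages
--
--     return True
--
-- def distribute_books(books, students):
--     if students > len(books):
--         return -1
--
--     low = max(books)
--     high = sum(books)
--     result = high
--
--     while low <= high:
--         mid = (low + high) // 2
--
--         if is_possible(books, students, mid):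
--             result = mid
--             high = mid - 1
--         else:
--             low = mid + 1
--
--     return result
-- ===== SOURCE B (Python) =====
-- def distribute_books(books, students):
--     n = len(books)
--     if students > n:
--         return -1
--     prefix = [0]
--     for pages in books:
--         prefix.append(prefix[-1] + pages)
--     biggest = max(books)
--     total = prefix[n]
--
--     def fits(cap):
--         groups, base = 1, 0
--         for lo, hi in zip(prefix, prefix[1:]):
--             if hi - lo > cap:
--                 return False
--             if hi - base > cap:
--                 groups += 1
--                 base = lo
--         return groups <= students
--
--     def search(lo, hi, best):
--         if lo > hi:
--             return best
--         mid = (lo + hi) // 2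
--         if fits(mid):
--             return search(lo, mid - 1, mid)
--         return search(mid + 1, hi, best)
--
--     return search(biggest, total, total)
-- ===== Notes on version B (the rewrite author's own statement) =====
-- stated objective: alternative
-- what changed: The stateful greedy checker (running current_pages, three early returns, mid-loop student_count guard) is replaced by a pure scan over adjacent prefix-sum pairs that counts groups and compares once at the end, and the mutable low/high/result while-loop by a recursive bisection; costs are the same.
import Mathlib
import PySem

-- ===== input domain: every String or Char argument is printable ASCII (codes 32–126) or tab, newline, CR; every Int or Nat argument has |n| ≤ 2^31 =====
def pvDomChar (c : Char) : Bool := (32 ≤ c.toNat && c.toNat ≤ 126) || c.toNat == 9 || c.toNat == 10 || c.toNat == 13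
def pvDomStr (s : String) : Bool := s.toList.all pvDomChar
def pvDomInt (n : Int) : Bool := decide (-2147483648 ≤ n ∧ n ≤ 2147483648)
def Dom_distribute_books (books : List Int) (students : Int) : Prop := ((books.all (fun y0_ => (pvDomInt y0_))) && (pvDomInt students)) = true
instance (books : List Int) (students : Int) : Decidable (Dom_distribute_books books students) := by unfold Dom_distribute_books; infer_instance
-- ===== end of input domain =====

-- B replaces the stateful greedy checker (running current_pages, three early returns,
-- mid-loop student guard) by a pure scan over adjacent prefix-sum pairs compared once at
-- the end, and the mutable low/high/result while-loop by a recursive bisection.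

-- ===== PORT A =====
-- is_possible: for-loop over books with early returns, state (student_count, current_pages)
def isPossibleAux (students max_pages : Int) : List Int → Int → Int → Bool
  | [], _, _ => true
  | pages :: rest, student_count, current_pages =>
    if pages > max_pages then false
    else if current_pages + pages > max_pages then
      if student_count + 1 > students then false
      else isPossibleAux students max_pages rest (student_count + 1) pages
    else isPossibleAux students max_pages rest student_count (current_pages + pages)

def is_possible (books : List Int) (students max_pages : Int) : Bool :=
  isPossibleAux students max_pages books 1 0

-- the 'while low <= high' loop with its (low, high, result) state; the Nat fuel only
-- makes the recursion structural: it starts at the search width, which shrinks by at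
-- least 1 per iteration (mid stays in [low, high]), so fuel 0 implies low > high
def loopA (books : List Int) (students : Int) : Nat → Int → Int → Int → Int
  | 0, _, _, result => result
  | fuel + 1, low, high, result =>
    if low ≤ high then
      let mid := PySem.Int.floordiv (low + high) 2
      if is_possible books students mid then
        loopA books students fuel low (mid - 1) mid
      else
        loopA books students fuel (mid + 1) high result
    else result

def distribute_books (books : List Int) (students : Int) : Int :=
  if students > (books.length : Int) then -1
  else
    -- max(books): Python raises ValueError on []; Pre_ excludes that, .getD 0 is a dummy
    let low := (PySem.List.max? books (fun x => x)).getD 0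
    let high := books.sum
    loopA books students (high + 1 - low).toNat low high high

-- ===== PORT B =====
-- prefix = [0]; for pages in books: prefix.append(prefix[-1] + pages)
def buildPrefix (acc : Int) : List Int → List Int
  | [] => [acc]
  | pages :: rest => acc :: buildPrefix (acc + pages) rest

-- fits(cap): scan over zip(prefix, prefix[1:]) with state (groups, base), compare at the end
def fitsAux (students cap : Int) : List (Int × Int) → Int → Int → Bool
  | [], groups, _ => groups ≤ students
  | (lo, hi) :: rest, groups, base =>
    if hi - lo > cap then false
    else if hi - base > cap then fitsAux students cap rest (groups + 1) lo
    else fitsAux students cap rest groups base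

-- search(lo, hi, best): recursive bisection (same fuel guard as loopA)
def searchB (pairs : List (Int × Int)) (students : Int) : Nat → Int → Int → Int → Int
  | 0, _, _, best => best
  | fuel + 1, lo, hi, best =>
    if lo ≤ hi then
      let mid := PySem.Int.floordiv (lo + hi) 2
      if fitsAux students mid pairs 1 0 then
        searchB pairs students fuel lo (mid - 1) mid
      else
        searchB pairs students fuel (mid + 1) hi best
    else best

def distribute_books_alt (books : List Int) (students : Int) : Int :=
  if students > (books.length : Int) then -1
  else
    let pre := buildPrefix 0 books
    let biggest := (PySem.List.max? books (fun x => x)).getD 0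
    let total := pre.getLastD 0
    searchB (pre.zip pre.tail) students (total + 1 - biggest).toNat biggest total total

-- ===== PRECONDITION & SPEC =====
-- Pre_ excludes exactly the inputs where Python A raises: books = [] with students ≤ 0
-- (max([]) is a ValueError; with students > 0 the guard returns -1 first). B raises there too.
def Pre_distribute_books (books : List Int) (students : Int) : Prop :=
  books ≠ [] ∨ 0 < students
instance (books : List Int) (students : Int) : Decidable (Pre_distribute_books books students) := by unfold Pre_distribute_books; infer_instance

def pvWitness_distribute_books : List Int × Int := ([12, 34, 67, 90], 2)

def Spec_distribute_books (books : List Int) (students : Int) (out : Int) : Prop := out = distribute_books_alt books students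
instance (books : List Int) (students : Int) (out : Int) : Decidable (Spec_distribute_books books students out) := by unfold Spec_distribute_books; infer_instance

-- ===== CLAIM (what is proved, stated in full; the proofs are below) =====
def Claim_equal_distribute_books : Prop := ∀ (books : List Int) (students : Int), Dom_distribute_books books students → Pre_distribute_books books students → Spec_distribute_books books students (distribute_books books students)

-- ===== LEMMAS AND PROOFS =====

-- number of splits the greedy scan makes from running-sum state `cur`
def gsplits (cap cur : Int) : List Int → Int
  | [] => 0
  | p :: rest => if cur + p > cap then 1 + gsplits cap p rest else gsplits cap (cur + p) rest

theorem gsplits_nonneg (cap cur : Int) (l : List Int) : 0 ≤ gsplits cap cur l := by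
  induction l generalizing cur with
  | nil => simp [gsplits]
  | cons p rest ih =>
    simp only [gsplits]
    split
    · have := ih p; omega
    · exact ih _

-- no split means every running prefix (in particular the total) stayed ≤ cap
theorem gsplits_zero_sum (cap cur : Int) (l : List Int) :
    gsplits cap cur l = 0 → l ≠ [] → cur + l.sum ≤ cap := by
  induction l generalizing cur with
  | nil => intro _ h; exact absurd rfl h
  | cons p rest ih =>
    intro h _
    by_cases hs : cur + p > cap
    · exfalso
      rw [gsplits, if_pos hs] at h
      have := gsplits_nonneg cap p rest
      omega
    · rw [gsplits, if_neg hs] at h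
      cases rest with
      | nil => simp only [List.sum_cons, List.sum_nil, add_zero]; omega
      | cons q r =>
        have := ih (cur + p) h (by simp)
        simp only [List.sum_cons] at *
        omega

-- closed form of A's checker
theorem isPossibleAux_eq (students cap : Int) (l : List Int) (cnt cur : Int) :
    isPossibleAux students cap l cnt cur =
      (l.all (fun p => decide (p ≤ cap)) &&
        ((gsplits cap cur l == 0) || decide (cnt + gsplits cap cur l ≤ students))) := by
  induction l generalizing cnt cur with
  | nil => simp [isPossibleAux, gsplits]
  | cons p rest ih =>
    by_cases hp : p > cap
    · simp [isPossibleAux, hp]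
    · have hp' : p ≤ cap := by omega
      by_cases hs : cur + p > cap
      · have hn := gsplits_nonneg cap p rest
        have hg : gsplits cap cur (p :: rest) = 1 + gsplits cap p rest := by
          simp [gsplits, hs]
        by_cases hc : cnt + 1 > students
        · have h2 : ¬ (cnt + (1 + gsplits cap p rest) ≤ students) := by omega
          simp [isPossibleAux, hp, hs, hc, hg, h2]
          omega
        · have e3 : ∀ x : Int, cnt + 1 + x = cnt + (1 + x) := by intro x; ring
          simp only [isPossibleAux, if_neg hp, if_pos hs, if_neg hc, ih, hg, e3,
            List.all_cons, hp', decide_true, Bool.true_and]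
          by_cases h0 : gsplits cap p rest = 0
          · have hc' : cnt + (1 + gsplits cap p rest) ≤ students := by omega
            simp [h0]
            exact fun _ => by omega
          · have h1 : ¬ (1 + gsplits cap p rest = 0) := by omega
            have e1 : ((gsplits cap p rest : Int) == 0) = false := by simpa using h0
            have e2 : ((1 + gsplits cap p rest : Int) == 0) = false := by simpa using h1
            rw [e1, e2]
      · have hg : gsplits cap cur (p :: rest) = gsplits cap (cur + p) rest := by
          simp [gsplits, hs]
        simp [isPossibleAux, hp, hs, ih, hg, hp']

-- prefix pairs: zip(pre, pre[1:]) starting from accumulator a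
def pairsOf (a : Int) (l : List Int) : List (Int × Int) :=
  (buildPrefix a l).zip (buildPrefix a l).tail

theorem pairsOf_cons (a p : Int) (l : List Int) :
    pairsOf a (p :: l) = (a, a + p) :: pairsOf (a + p) l := by
  cases l <;> simp [pairsOf, buildPrefix]

theorem pairsOf_nil (a : Int) : pairsOf a [] = [] := by simp [pairsOf, buildPrefix]

-- closed form of B's checker
theorem fitsAux_eq (students cap : Int) (l : List Int) (a g b : Int) :
    fitsAux students cap (pairsOf a l) g b =
      (l.all (fun p => decide (p ≤ cap)) &&
        decide (g + gsplits cap (a - b) l ≤ students)) := by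
  induction l generalizing a g b with
  | nil => simp [pairsOf_nil, fitsAux, gsplits]
  | cons p rest ih =>
    rw [pairsOf_cons]
    have hpp : a + p - a = p := by ring
    by_cases hp : a + p - a > cap
    · have hpc : ¬ (p ≤ cap) := by omega
      simp [fitsAux, hpc]
    · have hp' : p ≤ cap := by omega
      by_cases hs : a - b + p > cap
      · have hs' : a + p - b > cap := by omega
        have hg : gsplits cap (a - b) (p :: rest) = 1 + gsplits cap p rest := by
          simp [gsplits, hs]
        have e3 : ∀ x : Int, g + 1 + x = g + (1 + x) := by intro x; ring
        simp only [fitsAux, if_pos hs', ih, hg, hpp, e3,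
          List.all_cons, hp', decide_true, Bool.true_and]
        rw [if_neg (show ¬ p > cap by omega)]
      · have hs' : ¬ (a + p - b > cap) := by omega
        have hg : gsplits cap (a - b) (p :: rest) = gsplits cap (a - b + p) rest := by
          simp [gsplits, hs]
        have he : a + p - b = a - b + p := by ring
        simp only [fitsAux, ih, hg, he, hpp,
          List.all_cons, hp', decide_true, Bool.true_and]
        rw [if_neg (show ¬ p > cap by omega), if_neg hs]

-- with at least one student the two checkers agree
theorem checker_eq (books : List Int) (students cap : Int) (h1 : 1 ≤ students) :
    is_possible books students cap = fitsAux students cap (pairsOf 0 books) 1 0 := by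
  rw [is_possible, isPossibleAux_eq, fitsAux_eq]
  have hn := gsplits_nonneg cap ((0:Int) - 0) books
  have he : (0:Int) - 0 = 0 := by ring
  rw [he] at hn
  simp only [he]
  by_cases h0 : gsplits cap 0 books = 0
  · simp [h0, h1]
  · have e1 : ((gsplits cap 0 books : Int) == 0) = false := by simpa using h0
    rw [e1, Bool.false_or]

-- with at least one student the two bisections agree step for step (same fuel)
theorem loops_eq (books : List Int) (students : Int) (h1 : 1 ≤ students) :
    ∀ fuel low high result,
      loopA books students fuel low high result =
        searchB (pairsOf 0 books) students fuel low high result := by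
  intro fuel
  induction fuel with
  | zero => intro lo hi res; rfl
  | succ n ih =>
    intro lo hi res
    show loopA books students (n + 1) lo hi res = searchB (pairsOf 0 books) students (n + 1) lo hi res
    rw [loopA, searchB]
    by_cases hlh : lo ≤ hi
    · simp only [if_pos hlh, ← checker_eq books students _ h1]
      by_cases hf : is_possible books students (PySem.Int.floordiv (lo + hi) 2) = true
      · simp only [if_pos hf, ih]
      · simp only [if_neg hf, ih]
    · simp [hlh]

-- with students ≤ 0, B's checker is always false, so the bisection returns its seed
theorem searchB_const (pairs : List (Int × Int)) (students : Int)
    (hfalse : ∀ cap g b, 1 ≤ g → fitsAux students cap pairs g b = false) :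
    ∀ fuel lo hi best, searchB pairs students fuel lo hi best = best := by
  intro fuel
  induction fuel with
  | zero => intro lo hi best; rfl
  | succ n ih =>
    intro lo hi best
    show searchB pairs students (n + 1) lo hi best = best
    rw [searchB]
    by_cases hlh : lo ≤ hi
    · simp only [if_pos hlh, hfalse _ 1 0 le_rfl, Bool.false_eq_true, if_false, ih]
    · simp [hlh]

-- with students ≤ 0, A's checker accepts only caps ≥ sum, so the result stays sum
theorem loopA_const (books : List Int) (students : Int) (h0 : students ≤ 0)
    (hne : books ≠ []) :
    ∀ fuel low high, high ≤ books.sum →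
      loopA books students fuel low high books.sum = books.sum := by
  intro fuel
  induction fuel with
  | zero => intro lo hi _; rfl
  | succ n ih =>
    intro lo hi hhi
    show loopA books students (n + 1) lo hi books.sum = books.sum
    rw [loopA]
    by_cases hlh : lo ≤ hi
    · simp only [if_pos hlh]
      have hmid := PySem.Int.floordiv_two_mid_bounds hlh
      set mid := PySem.Int.floordiv (lo + hi) 2 with hm
      by_cases hf : is_possible books students mid = true
      · -- feasible: the scan made no split, so sum ≤ mid ≤ hi ≤ sum, i.e. mid = sum
        have hf' := hf
        rw [is_possible, isPossibleAux_eq, Bool.and_eq_true, Bool.or_eq_true] at hf'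
        have hn := gsplits_nonneg mid 0 books
        have hz : gsplits mid 0 books = 0 := by
          rcases hf' with ⟨-, h | h⟩
          · simpa using h
          · have := of_decide_eq_true h; omega
        obtain ⟨p, rest, rfl⟩ : ∃ p rest, books = p :: rest := by
          cases books with
          | nil => exact absurd rfl hne
          | cons p rest => exact ⟨p, rest, rfl⟩
        have hs := gsplits_zero_sum mid 0 (p :: rest) hz (by simp)
        have hms : mid = (p :: rest).sum := by omega
        rw [if_pos hf, hms]
        exact ih lo ((p :: rest).sum - 1) (by omega)
      · simp only [if_neg hf]
        exact ih (mid + 1) hi hhi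
    · simp [hlh]

theorem buildPrefix_getLastD (l : List Int) (a d : Int) :
    (buildPrefix a l).getLastD d = a + l.sum := by
  induction l generalizing a d with
  | nil => simp [buildPrefix]
  | cons p rest ih =>
    simp only [buildPrefix, List.sum_cons, List.getLastD_cons, ih]
    ring

-- ===== VERDICT (by name: the statement is the Claim_ definition above) =====
theorem distribute_books_spec : Claim_equal_distribute_books := by
  intro books students _ hpre
  unfold Spec_distribute_books distribute_books distribute_books_alt
  by_cases hg : students > (books.length : Int)
  · simp [hg]
  · simp only [if_neg hg]
    show loopA books students
        (books.sum + 1 - (PySem.List.max? books (fun x => x)).getD 0).toNat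
        ((PySem.List.max? books (fun x => x)).getD 0) books.sum books.sum =
      searchB ((buildPrefix 0 books).zip (buildPrefix 0 books).tail) students
        ((buildPrefix 0 books).getLastD 0 + 1 - (PySem.List.max? books (fun x => x)).getD 0).toNat
        ((PySem.List.max? books (fun x => x)).getD 0)
        ((buildPrefix 0 books).getLastD 0) ((buildPrefix 0 books).getLastD 0)
    rw [buildPrefix_getLastD, zero_add]
    by_cases h1 : 1 ≤ students
    · exact loops_eq books students h1 _ _ _ _
    · -- students ≤ 0: books ≠ [] by Pre_; both sides return sum
      have h0 : students ≤ 0 := by omega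
      have hne : books ≠ [] := by
        rcases hpre with h | h
        · exact h
        · omega
      rw [loopA_const books students h0 hne _ _ _ le_rfl]
      refine (searchB_const _ students ?_ _ _ _ _).symm
      intro cap g b hgge
      show fitsAux students cap (pairsOf 0 books) g b = false
      rw [fitsAux_eq]
      have := gsplits_nonneg cap (0 - b) books
      simp only [Bool.and_eq_false_iff, decide_eq_false_iff_not]
      right; omega
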